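-- pv_equiv track=rewrite | github.com/ZhangCheng-zh/blog | Robinhood/triggerCount.py | triggerCountError
-- ===== SOURCE A (Python) =====
-- from collections import defaultdict, deque
--
-- def triggerCountError(edges, entry):
--     g = defaultdict(list)
--     for u, v in edges:
--         g[u].append(v)
--
--     count = defaultdict(int)
--     count[entry] = 1
--
--
--     # start bfs
--     q = deque([entry])
--     visited = set([entry])
--
--     while q:
--         u = q.popleft()
--         for v in g[u]:
--             count[v] += count[u]
--             if v not in visited:
--                 visited.add(v)
--                 q.append(v)
--
--     return count
-- ===== SOURCE B (Python) =====
-- from collections import defaultdict, deque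
--
-- def triggerCountError(edges, entry):
--     g = defaultdict(list)
--     for u, v in edges:
--         g[u].append(v)
--
--     # phase 1: BFS from entry that only records the dequeue order
--     order = []
--     q = deque([entry])
--     visited = {entry}
--     while q:
--         u = q.popleft()
--         order.append(u)
--         for v in g[u]:
--             if v not in visited:
--                 visited.add(v)
--                 q.append(v)
--
--     # phase 2: propagate counts along edges following that order
--     count = defaultdict(int)
--     count[entry] = 1
--     for u in order:
--         for v in g[u]:
--             count[v] += count[u]
--     return count
-- ===== Notes on version B (the rewrite author's own statement) =====
-- stated objective: alternative
-- what changed: A propagates counts inside the BFS loop itself; B splits the work into two phases: a BFS that only records the dequeue order, then a separate pass over that order that propagates counts along the edges.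
import Mathlib
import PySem

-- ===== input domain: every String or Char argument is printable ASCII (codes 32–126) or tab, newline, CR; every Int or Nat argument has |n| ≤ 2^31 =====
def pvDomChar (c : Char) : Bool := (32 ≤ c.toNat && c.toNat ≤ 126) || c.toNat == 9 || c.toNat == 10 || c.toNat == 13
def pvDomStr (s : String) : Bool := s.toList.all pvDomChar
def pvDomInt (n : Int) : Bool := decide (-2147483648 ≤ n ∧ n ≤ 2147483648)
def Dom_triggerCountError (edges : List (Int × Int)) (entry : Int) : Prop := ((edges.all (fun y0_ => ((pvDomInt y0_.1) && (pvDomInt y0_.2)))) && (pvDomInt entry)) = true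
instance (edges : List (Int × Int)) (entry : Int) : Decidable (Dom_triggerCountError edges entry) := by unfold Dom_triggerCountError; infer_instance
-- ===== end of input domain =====

-- B splits A's single count-propagating BFS loop into two phases (BFS order first, then propagation); same cost, different decomposition.


-- ===== PORT A =====
-- g = defaultdict(list); for u, v in edges: g[u].append(v)
def pvBuildG (edges : List (Int × Int)) : PySem.Dict Int (List Int) :=
  edges.foldl (fun g uv => g.insert uv.1 (g.getD uv.1 [] ++ [uv.2])) PySem.Dict.empty

-- A's while loop, state (q, visited, count); fuel is a totality guard only
-- (each pop consumes fuel; pushes ≤ 1 + edges.length, so edges.length + 1 fuel always empties q).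
def pvBfsA (g : PySem.Dict Int (List Int)) :
    Nat → List Int → PySem.Set Int → PySem.Dict Int Int → PySem.Dict Int Int
  | 0, _, _, count => count
  | _ + 1, [], _, count => count
  | fuel + 1, u :: q, visited, count =>
    let st := (g.getD u []).foldl
      (fun (st : PySem.Dict Int Int × PySem.Set Int × List Int) v =>
        let c := st.1.insert v (st.1.getD v 0 + st.1.getD u 0)
        if v ∈ st.2.1 then (c, st.2.1, st.2.2)
        else (c, st.2.1.add v, st.2.2 ++ [v]))
      (count, visited, q)
    pvBfsA g fuel st.2.2 st.2.1 st.1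

def triggerCountError (edges : List (Int × Int)) (entry : Int) : List (Int × Int) :=
  let g := pvBuildG edges
  let count := (PySem.Dict.empty : PySem.Dict Int Int).insert entry 1
  (pvBfsA g (edges.length + 1) [entry] (PySem.Set.ofList [entry]) count).items

-- ===== PORT B =====
-- phase 1: BFS that only records the dequeue order (same fuel guard as A's port)
def pvBfsOrder (g : PySem.Dict Int (List Int)) :
    Nat → List Int → PySem.Set Int → List Int → List Int
  | 0, _, _, order => order
  | _ + 1, [], _, order => order
  | fuel + 1, u :: q, visited, order =>
    let st := (g.getD u []).foldl
      (fun (st : PySem.Set Int × List Int) v =>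
        if v ∈ st.1 then st else (st.1.add v, st.2 ++ [v]))
      (visited, q)
    pvBfsOrder g fuel st.2 st.1 (order ++ [u])

-- phase 2: for u in order: for v in g[u]: count[v] += count[u]
def pvPropagate (g : PySem.Dict Int (List Int)) (order : List Int)
    (count : PySem.Dict Int Int) : PySem.Dict Int Int :=
  order.foldl
    (fun count u =>
      (g.getD u []).foldl (fun c v => c.insert v (c.getD v 0 + c.getD u 0)) count)
    count

def triggerCountError_alt (edges : List (Int × Int)) (entry : Int) : List (Int × Int) :=
  let g := pvBuildG edges
  let order := pvBfsOrder g (edges.length + 1) [entry] (PySem.Set.ofList [entry]) []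
  (pvPropagate g order ((PySem.Dict.empty : PySem.Dict Int Int).insert entry 1)).items

-- ===== PRECONDITION & SPEC =====
def Spec_triggerCountError (edges : List (Int × Int)) (entry : Int) (out : List (Int × Int)) : Prop := out = triggerCountError_alt edges entry
instance (edges : List (Int × Int)) (entry : Int) (out : List (Int × Int)) : Decidable (Spec_triggerCountError edges entry out) := by unfold Spec_triggerCountError; infer_instance

-- ===== CLAIM (what is proved, stated in full; the proofs are below) =====
def Claim_equal_triggerCountError : Prop := ∀ (edges : List (Int × Int)) (entry : Int), Dom_triggerCountError edges entry → Spec_triggerCountError edges entry (triggerCountError edges entry)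

-- ===== LEMMAS AND PROOFS =====

-- A's inner for-loop computes the count-fold and the (visited, queue)-fold componentwise:
-- the count update never reads visited/q, and the visited/q update never reads count.
theorem pvInnerSplit (u : Int) (vs : List Int) (count : PySem.Dict Int Int)
    (visited : PySem.Set Int) (q : List Int) :
    vs.foldl
      (fun (st : PySem.Dict Int Int × PySem.Set Int × List Int) v =>
        let c := st.1.insert v (st.1.getD v 0 + st.1.getD u 0)
        if v ∈ st.2.1 then (c, st.2.1, st.2.2)
        else (c, st.2.1.add v, st.2.2 ++ [v]))
      (count, visited, q)
    = (vs.foldl (fun c v => c.insert v (c.getD v 0 + c.getD u 0)) count,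
       vs.foldl (fun (st : PySem.Set Int × List Int) v =>
         if v ∈ st.1 then st else (st.1.add v, st.2 ++ [v])) (visited, q)) := by
  induction vs generalizing count visited q with
  | nil => rfl
  | cons v vs ih =>
    simp only [List.foldl_cons]
    by_cases h : v ∈ visited <;> simp [h, ih]

-- order accumulator of B's phase 1 peels off
theorem pvBfsOrder_acc (g : PySem.Dict Int (List Int)) (fuel : Nat) (q : List Int)
    (visited : PySem.Set Int) (order : List Int) :
    pvBfsOrder g fuel q visited order = order ++ pvBfsOrder g fuel q visited [] := by
  induction fuel generalizing q visited order with
  | zero => simp [pvBfsOrder]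
  | succ fuel ih =>
    cases q with
    | nil => simp [pvBfsOrder]
    | cons u q =>
      simp only [pvBfsOrder, List.nil_append]
      rw [ih (order := order ++ [u]), ih (order := [u])]
      simp

-- the main bridge: A's count-carrying BFS equals propagation over B's BFS order
theorem pvBfs_eq_propagate (g : PySem.Dict Int (List Int)) (fuel : Nat) (q : List Int)
    (visited : PySem.Set Int) (count : PySem.Dict Int Int) :
    pvBfsA g fuel q visited count
      = pvPropagate g (pvBfsOrder g fuel q visited []) count := by
  induction fuel generalizing q visited count with
  | zero => simp [pvBfsA, pvBfsOrder, pvPropagate]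
  | succ fuel ih =>
    cases q with
    | nil => simp [pvBfsA, pvBfsOrder, pvPropagate]
    | cons u q =>
      simp only [pvBfsA, pvBfsOrder, pvInnerSplit]
      rw [pvBfsOrder_acc, ih]
      simp [pvPropagate]

-- ===== VERDICT (by name: the statement is the Claim_ definition above) =====
theorem triggerCountError_spec : Claim_equal_triggerCountError := by
  intro edges entry _
  simp only [Spec_triggerCountError, triggerCountError, triggerCountError_alt]
  rw [pvBfs_eq_propagate]
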